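-- pv_equiv track=rewrite | github.com/SphRbtHyk/ScriptioContinuaSegmenter | src/sc_segmenter/training/ground_truth_annotator.py | quadrimodal_annotation
-- ===== SOURCE A (Python) =====
-- def quadrimodal_annotation(input_string: str) -> list[str]:
--     """Perform a quadrimodal annotation of a string, and returns
--     the corresponding labels for the training of the segmentation
--     model:
--         - B if the character is the beginning of a word.
--         - I if the character is inside the word.
--         - E if the character is at the end of the word.
--         - S if the character is a single one.
--
--     Args:
--         input_string (str): The string to use as ground truth to
--             build the labels.
--
--     Returns:
--         annotations (list[str]): The labels to use for training
--             the model.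
--     """
--     annotations = []
--     for word in input_string.split():
--         # Check if the length of the word is 1
--         if len(word) == 1:
--             annotations.extend("S")
--         else:
--             annotations.extend(["B"] + ["I"] *
--                                (len(word) - 2) + ["E"])
--     return annotations
-- ===== SOURCE B (Python) =====
-- def quadrimodal_annotation(input_string: str) -> list[str]:
--     """Single pass over the characters: classify each non-whitespace character
--     by whether a word boundary lies before it (tracked flag) and after it
--     (one-character lookahead), instead of splitting into words and emitting
--     per-word BIES templates."""
--     labels = []
--     prev_ws = True
--     n = len(input_string)
--     for i, c in enumerate(input_string):
--         if c.isspace():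
--             prev_ws = True
--             continue
--         at_end = i + 1 == n or input_string[i + 1].isspace()
--         labels.append("S" if prev_ws and at_end else
--                       "B" if prev_ws else
--                       "E" if at_end else "I")
--         prev_ws = False
--     return labels
-- ===== Notes on version B (the rewrite author's own statement) =====
-- stated objective: alternative
-- what changed: Replaces split-into-words plus per-word BIES template emission with a single character-by-character pass that labels each non-whitespace character from a previous-boundary flag and one-character lookahead.
import Mathlib
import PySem

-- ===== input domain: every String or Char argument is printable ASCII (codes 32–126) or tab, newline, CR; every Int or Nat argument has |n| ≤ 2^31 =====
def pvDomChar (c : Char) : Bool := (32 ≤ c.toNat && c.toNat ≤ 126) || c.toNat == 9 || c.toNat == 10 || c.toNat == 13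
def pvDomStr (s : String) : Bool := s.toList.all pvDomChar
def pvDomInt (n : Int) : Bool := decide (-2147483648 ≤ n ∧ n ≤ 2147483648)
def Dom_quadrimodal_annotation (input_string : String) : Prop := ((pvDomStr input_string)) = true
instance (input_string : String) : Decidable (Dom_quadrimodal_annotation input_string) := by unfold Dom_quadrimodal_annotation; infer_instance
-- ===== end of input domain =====

-- B replaces A's split-into-words + per-word BIES templates by a single pass that labels each
-- non-whitespace character from a previous-boundary flag and one-character lookahead (objective: alternative).

-- ===== PORT A =====
def quadrimodal_annotation (input_string : String) : List String :=
  (PySem.Str.split₀ input_string).foldl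
    (fun annotations word =>
      if PySem.Str.len word = 1 then
        annotations ++ ["S"]
      else
        annotations ++ (["B"] ++ List.replicate (PySem.Str.len word - 2).toNat "I" ++ ["E"]))
    []

-- ===== PORT B =====
-- loop of Source B: prev_ws flag carried through the pass; the lookahead input_string[i+1] is the
-- head of the remaining characters (exact: i+1 == n iff the rest is empty).
def quadAltGo (prevWs : Bool) : List Char → List String
  | [] => []
  | c :: rest =>
    if PySem.Chars.isspace c then
      quadAltGo true rest
    else
      let atEnd := match rest with
        | [] => true
        | d :: _ => PySem.Chars.isspace d
      (if prevWs && atEnd then "S" else if prevWs then "B" else if atEnd then "E" else "I")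
        :: quadAltGo false rest

def quadrimodal_annotation_alt (input_string : String) : List String :=
  quadAltGo true input_string.toList

-- ===== PRECONDITION & SPEC =====
def Spec_quadrimodal_annotation (input_string : String) (out : List String) : Prop := out = quadrimodal_annotation_alt input_string
instance (input_string : String) (out : List String) : Decidable (Spec_quadrimodal_annotation input_string out) := by unfold Spec_quadrimodal_annotation; infer_instance

-- ===== CLAIM (what is proved, stated in full; the proofs are below) =====
def Claim_equal_quadrimodal_annotation : Prop := ∀ (input_string : String), Dom_quadrimodal_annotation input_string → Spec_quadrimodal_annotation input_string (quadrimodal_annotation input_string)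

-- ===== LEMMAS AND PROOFS =====

-- labels A's template assigns to a whole word of length k
def pvWL (k : Nat) : List String :=
  if k = 1 then ["S"] else "B" :: (List.replicate (k - 2) "I" ++ ["E"])

def pvLabels (ws : List (List Char)) : List String :=
  ws.flatMap (fun w => pvWL w.length)

-- labels the template assigns to the first k characters of the current (open) word,
-- given the characters cs that follow them
def pvOpen (k : Nat) (cs : List Char) : List String :=
  match cs with
  | [] => pvWL k
  | d :: _ => if PySem.Chars.isspace d then pvWL k else "B" :: List.replicate (k - 1) "I"

theorem pvGoAcc (cs : List Char) : ∀ cur acc,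
    PySem.Chars.split₀.go cs cur acc = acc.reverse ++ PySem.Chars.split₀.go cs cur [] := by
  induction cs with
  | nil =>
    intro cur acc
    simp only [PySem.Chars.split₀.go]
    split <;> simp
  | cons c rest ih =>
    intro cur acc
    simp only [PySem.Chars.split₀.go]
    split
    · split
      · exact ih [] acc
      · rw [ih [] (cur.reverse :: acc), ih [] [cur.reverse]]
        simp
    · exact ih (c :: cur) acc

theorem pvMain (cs : List Char) :
    (pvLabels (PySem.Chars.split₀.go cs [] []) = quadAltGo true cs) ∧
    (∀ c cur, pvLabels (PySem.Chars.split₀.go cs (c :: cur) []) =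
      pvOpen (cur.length + 1) cs ++ quadAltGo false cs) := by
  induction cs with
  | nil =>
    refine ⟨by simp [PySem.Chars.split₀.go, pvLabels, quadAltGo], ?_⟩
    intro c cur
    simp [PySem.Chars.split₀.go, pvLabels, pvOpen, pvWL, quadAltGo]
  | cons d rest ih =>
    constructor
    · simp only [PySem.Chars.split₀.go, quadAltGo, List.isEmpty_nil, if_true]
      by_cases hd : PySem.Chars.isspace d
      · simp [hd, ih.1]
      · simp only [hd, if_false, Bool.false_eq_true]
        rw [ih.2 d []]
        cases rest with
        | nil => simp [pvOpen, pvWL, quadAltGo]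
        | cons e tail =>
          by_cases he : PySem.Chars.isspace e <;>
            simp [pvOpen, pvWL, he, quadAltGo]
    · intro c cur
      simp only [PySem.Chars.split₀.go]
      by_cases hd : PySem.Chars.isspace d
      · simp only [hd, if_true, List.isEmpty_cons, Bool.false_eq_true, if_false]
        rw [pvGoAcc rest [] [(c :: cur).reverse]]
        have : pvLabels ([(c :: cur).reverse] ++ PySem.Chars.split₀.go rest [] []) =
            pvWL (cur.length + 1) ++ pvLabels (PySem.Chars.split₀.go rest [] []) := by
          simp [pvLabels]
        simp only [List.reverse_cons, List.reverse_nil, List.nil_append] at this ⊢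
        rw [this, ih.1]
        simp [pvOpen, hd, quadAltGo]
      · simp only [hd, Bool.false_eq_true, if_false]
        rw [ih.2 d (c :: cur)]
        simp only [List.length_cons]
        have hopen : pvOpen (cur.length + 1 + 1) rest =
            pvOpen (cur.length + 1) (d :: rest) ++
              [match rest with
               | [] => "E"
               | e :: _ => if PySem.Chars.isspace e then "E" else "I"] := by
          cases rest with
          | nil => simp [pvOpen, pvWL, hd]
          | cons e tail =>
            by_cases he : PySem.Chars.isspace e <;>
              simp [pvOpen, pvWL, hd, he, List.replicate_succ']
        rw [hopen]
        cases rest with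
        | nil => simp [quadAltGo, hd]
        | cons e tail =>
          by_cases he : PySem.Chars.isspace e <;> simp [quadAltGo, hd, he]

theorem pvA_eq (s : String) :
    quadrimodal_annotation s = pvLabels (PySem.Chars.split₀ s.toList) := by
  unfold quadrimodal_annotation
  have hf : (fun (annotations : List String) (word : String) =>
      if PySem.Str.len word = 1 then annotations ++ ["S"]
      else annotations ++ (["B"] ++ List.replicate (PySem.Str.len word - 2).toNat "I" ++ ["E"])) =
      fun annotations word => annotations ++
        (if PySem.Str.len word = 1 then ["S"]
         else ["B"] ++ List.replicate (PySem.Str.len word - 2).toNat "I" ++ ["E"]) := by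
    funext annotations word
    split <;> rfl
  rw [hf, PySem.List.foldl_append_eq_flatMap]
  rw [PySem.Str.split₀, List.flatMap_map]
  simp only [pvLabels, List.nil_append]
  congr 1
  funext w
  simp only [PySem.Str.len, String.toList_ofList, pvWL]
  have h1 : ((w.length : Int) = 1) ↔ w.length = 1 := by exact_mod_cast Iff.rfl
  have h2 : ((w.length : Int) - 2).toNat = w.length - 2 := by omega
  rw [h2]
  split
  · rename_i h; rw [if_pos (h1.mp h)]
  · rename_i h; rw [if_neg (fun hh => h (h1.mpr hh))]; rfl
  

-- ===== VERDICT (by name: the statement is the Claim_ definition above) =====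
theorem quadrimodal_annotation_spec : Claim_equal_quadrimodal_annotation := by
  intro s _
  show quadrimodal_annotation s = quadrimodal_annotation_alt s
  rw [pvA_eq, quadrimodal_annotation_alt, PySem.Chars.split₀, (pvMain s.toList).1]
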